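-- pv_equiv track=rewrite | github.com/nahuelalmeira/midnight | src/midnight/strategy.py | keep_when_qualifies
-- ===== SOURCE A (Python) =====
-- from typing import Iterable, List, Optional
--
-- def keep_when_qualifies(rolled_dice: List[int]) -> List[int]:
--     dice_to_keep: List[int] = []
--     finish = 0
--     while not finish:
--         if 6 in rolled_dice:
--             dice_to_keep.append(6)
--             rolled_dice.remove(6)
--         elif len(rolled_dice) <= 2 and 5 in rolled_dice:
--             dice_to_keep.append(5)
--             rolled_dice.remove(5)
--         elif len(rolled_dice) == 1 and 4 in rolled_dice:
--             dice_to_keep.append(4)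
--             rolled_dice.remove(4)
--         else:
--             finish = 1
--     return dice_to_keep
-- ===== SOURCE B (Python) =====
-- from typing import List
--
-- def keep_when_qualifies(rolled_dice: List[int]) -> List[int]:
--     c6 = rolled_dice.count(6)
--     keep = [6] * c6
--     m = len(rolled_dice) - c6
--     if m <= 2:
--         c5 = rolled_dice.count(5)
--         keep += [5] * c5
--         if m - c5 == 1 and 4 in rolled_dice:
--             keep.append(4)
--     for d in keep:  # reproduce A's in-place mutation of the argument
--         rolled_dice.remove(d)
--     return keep
-- ===== Notes on version B (the rewrite author's own statement) =====
-- stated objective: alternative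
-- what changed: Replaces the priority while-loop that repeatedly scans and removes dice one at a time with a single count-then-construct pass: count the 6s, decide the 5s/4 case from the remaining length, and build the kept list directly (the same in-place removals are then replayed on the argument).
import Mathlib
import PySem

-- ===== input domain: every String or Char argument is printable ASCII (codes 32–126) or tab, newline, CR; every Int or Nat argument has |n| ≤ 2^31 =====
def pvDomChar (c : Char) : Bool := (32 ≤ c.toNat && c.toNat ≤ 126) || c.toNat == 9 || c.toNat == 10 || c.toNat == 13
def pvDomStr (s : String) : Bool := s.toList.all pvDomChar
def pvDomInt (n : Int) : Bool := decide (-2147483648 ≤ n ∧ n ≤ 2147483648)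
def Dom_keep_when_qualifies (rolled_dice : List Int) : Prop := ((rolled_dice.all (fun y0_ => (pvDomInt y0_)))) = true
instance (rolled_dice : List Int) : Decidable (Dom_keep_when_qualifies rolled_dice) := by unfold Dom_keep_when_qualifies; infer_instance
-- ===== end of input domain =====

-- B replaces A's priority remove-loop by one count-then-construct pass (alternative decomposition);
-- A mutates its argument in place and B replays the same removals, but the equivalence proved here is about the RETURN value only.

-- ===== PORT A =====
-- A's while-loop: each iteration removes one die (guarded `rolled_dice.remove(v)` with v ∈ xs
-- equals List.erase by PySem.List.remove?_eq_some_erase) or sets finish.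
def pvLoopA (xs acc : List Int) : List Int :=
  if h6 : (6 : Int) ∈ xs then
    pvLoopA (xs.erase 6) (acc ++ [6])
  else if h5 : xs.length ≤ 2 ∧ (5 : Int) ∈ xs then
    pvLoopA (xs.erase 5) (acc ++ [5])
  else if h4 : xs.length = 1 ∧ (4 : Int) ∈ xs then
    pvLoopA (xs.erase 4) (acc ++ [4])
  else acc
termination_by xs.length
decreasing_by
  · have h := List.length_erase_of_mem h6
    have hp := List.length_pos_of_mem h6
    omega
  · have h := List.length_erase_of_mem h5.2
    have hp := List.length_pos_of_mem h5.2
    omega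
  · have h := List.length_erase_of_mem h4.2
    have hp := List.length_pos_of_mem h4.2
    omega

def keep_when_qualifies (rolled_dice : List Int) : List Int :=
  pvLoopA rolled_dice []

-- ===== PORT B =====
def keep_when_qualifies_alt (rolled_dice : List Int) : List Int :=
  let c6 := PySem.List.count rolled_dice 6
  let keep := List.replicate c6 (6 : Int)
  let m : Int := (rolled_dice.length : Int) - (c6 : Int)
  if m ≤ 2 then
    let c5 := PySem.List.count rolled_dice 5
    let keep2 := keep ++ List.replicate c5 (5 : Int)
    if m - (c5 : Int) = 1 ∧ (4 : Int) ∈ rolled_dice then keep2 ++ [4] else keep2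
  else keep

-- ===== PRECONDITION & SPEC =====
def Spec_keep_when_qualifies (rolled_dice : List Int) (out : List Int) : Prop := out = keep_when_qualifies_alt rolled_dice
instance (rolled_dice : List Int) (out : List Int) : Decidable (Spec_keep_when_qualifies rolled_dice out) := by unfold Spec_keep_when_qualifies; infer_instance

-- ===== CLAIM (what is proved, stated in full; the proofs are below) =====
def Claim_equal_keep_when_qualifies : Prop := ∀ (rolled_dice : List Int), Dom_keep_when_qualifies rolled_dice → Spec_keep_when_qualifies rolled_dice (keep_when_qualifies rolled_dice)

-- ===== LEMMAS AND PROOFS =====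

lemma alt_cons6 (xs : List Int) (h6 : (6 : Int) ∈ xs) :
    keep_when_qualifies_alt xs = 6 :: keep_when_qualifies_alt (xs.erase 6) := by
  have hcnt : 0 < List.count 6 xs := List.count_pos_iff.mpr h6
  have hlen : List.count 6 xs ≤ xs.length := List.count_le_length
  simp only [keep_when_qualifies_alt, PySem.List.count_eq,
    List.count_erase_self, List.count_erase_of_ne (by decide : (5 : Int) ≠ 6),
    List.length_erase_of_mem h6,
    List.mem_erase_of_ne (by decide : (4 : Int) ≠ 6)]
  have hm : ((xs.length - 1 : Nat) : Int) - ((List.count 6 xs - 1 : Nat) : Int)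
      = (xs.length : Int) - (List.count 6 xs : Int) := by omega
  rw [hm]
  have hrep : List.replicate (List.count 6 xs) (6 : Int) = 6 :: List.replicate (List.count 6 xs - 1) 6 := by
    conv_lhs => rw [← Nat.succ_pred_eq_of_pos hcnt, List.replicate_succ]
    rfl
  rw [hrep]
  split_ifs <;> simp

lemma alt_cons5 (xs : List Int) (h6 : (6 : Int) ∉ xs) (hl : xs.length ≤ 2) (h5 : (5 : Int) ∈ xs) :
    keep_when_qualifies_alt xs = 5 :: keep_when_qualifies_alt (xs.erase 5) := by
  have hcnt : 0 < List.count 5 xs := List.count_pos_iff.mpr h5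
  have hlen : List.count 5 xs ≤ xs.length := List.count_le_length
  have h6' : (6 : Int) ∉ xs.erase 5 := fun h => h6 (List.mem_of_mem_erase h)
  simp only [keep_when_qualifies_alt, PySem.List.count_eq,
    List.count_eq_zero.mpr h6, List.count_eq_zero.mpr h6',
    List.count_erase_self,
    List.length_erase_of_mem h5,
    List.mem_erase_of_ne (by decide : (4 : Int) ≠ 5)]
  have hm1 : ((xs.length : Int) - (0 : Nat) ≤ 2) := by omega
  have hm2 : (((xs.length - 1 : Nat) : Int) - (0 : Nat) ≤ 2) := by omega
  rw [if_pos hm1, if_pos hm2]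
  have hm : ((xs.length - 1 : Nat) : Int) - (0 : Nat) - ((List.count 5 xs - 1 : Nat) : Int)
      = (xs.length : Int) - (0 : Nat) - (List.count 5 xs : Int) := by omega
  rw [hm]
  have hrep : List.replicate (List.count 5 xs) (5 : Int) = 5 :: List.replicate (List.count 5 xs - 1) 5 := by
    conv_lhs => rw [← Nat.succ_pred_eq_of_pos hcnt, List.replicate_succ]
    rfl
  rw [hrep]
  split_ifs <;> simp

lemma alt_nil (xs : List Int) (h6 : (6 : Int) ∉ xs)
    (h5 : ¬ (xs.length ≤ 2 ∧ (5 : Int) ∈ xs)) (h4 : ¬ (xs.length = 1 ∧ (4 : Int) ∈ xs)) :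
    keep_when_qualifies_alt xs = [] := by
  simp only [keep_when_qualifies_alt, PySem.List.count_eq, List.count_eq_zero.mpr h6]
  by_cases hl : xs.length ≤ 2
  · have h5' : (5 : Int) ∉ xs := fun h => h5 ⟨hl, h⟩
    rw [if_pos (by omega : ((xs.length : Int) - ((0 : Nat) : Int) ≤ 2))]
    rw [List.count_eq_zero.mpr h5']
    rw [if_neg]
    · simp
    · rintro ⟨hm, hmem⟩
      exact h4 ⟨by omega, hmem⟩
  · rw [if_neg (by omega : ¬ ((xs.length : Int) - ((0 : Nat) : Int) ≤ 2))]
    simp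

lemma alt_single4 : keep_when_qualifies_alt [4] = [4] := by decide

lemma loopA_eq (n : Nat) : ∀ (xs acc : List Int), xs.length ≤ n →
    pvLoopA xs acc = acc ++ keep_when_qualifies_alt xs := by
  induction n with
  | zero =>
    intro xs acc h
    have hx : xs = [] := List.eq_nil_of_length_eq_zero (by omega)
    subst hx
    rw [pvLoopA]
    simp [keep_when_qualifies_alt, PySem.List.count_eq]
  | succ n ih =>
    intro xs acc h
    rw [pvLoopA]
    by_cases h6 : (6 : Int) ∈ xs
    · rw [dif_pos h6, ih _ _ (by have := List.length_erase_of_mem h6; omega),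
        alt_cons6 xs h6]
      simp
    · rw [dif_neg h6]
      by_cases h5 : xs.length ≤ 2 ∧ (5 : Int) ∈ xs
      · rw [dif_pos h5, ih _ _ (by have := List.length_erase_of_mem h5.2; omega),
          alt_cons5 xs h6 h5.1 h5.2]
        simp
      · rw [dif_neg h5]
        by_cases h4 : xs.length = 1 ∧ (4 : Int) ∈ xs
        · obtain ⟨hx⟩ := List.length_eq_one_iff.mp h4.1
          have hx4 : xs = [4] := by
            rcases List.length_eq_one_iff.mp h4.1 with ⟨a, ha⟩
            have : (4 : Int) ∈ [a] := ha ▸ h4.2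
            simp at this
            simp [ha, this]
          subst hx4
          rw [dif_pos h4]
          simp only [List.erase]
          rw [pvLoopA]
          norm_num [alt_single4]
        · rw [dif_neg h4, alt_nil xs h6 h5 h4]
          simp
theorem keep_spec_aux (xs : List Int) :
    keep_when_qualifies xs = keep_when_qualifies_alt xs := by
  have := loopA_eq xs.length xs [] le_rfl
  simpa [keep_when_qualifies] using this

-- ===== VERDICT (by name: the statement is the Claim_ definition above) =====
theorem keep_when_qualifies_spec : Claim_equal_keep_when_qualifies := by
  intro xs _
  unfold Spec_keep_when_qualifies
  exact keep_spec_aux xs
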